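-- pv_equiv track=rewrite | github.com/YouSH42/Capstone-Back | TravelChain/RAG/Packages/search_utils.py | collect_chunks_
-- ===== SOURCE A (Python) =====
-- def collect_chunks_(chunks, idxs, bound = 2000):
--     # size of chunk = 500 > size of string = 250
--     # pdf 1page maximum 1200 string
--     # upside 1000 string, downside 1000 string > upside 4 chunk, downsize 4 chunk
--     # >> collect until 2000 string or 4000 chunk size
--     newChunks = [[] for _ in range(len(idxs))]
--     halfBound = int(bound)//2
--
--     for index, _ in enumerate(newChunks):
--         idx = idxs[index]
--         upside = ""
--         while True:
--             if idx >= len(chunks) or (len(upside)+len(chunks[idx])) >= halfBound: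
--                 break
--             upside+=chunks[idx]
--             idx+=1
--
--         idx = idxs[index] - 1
--         downside = ""
--         while True:
--             if idx < 0 or (len(downside)+len(chunks[idx])) >= halfBound:
--                 break
--             downside+=chunks[idx]
--             idx-=1
--
--         newChunks[index]+=downside
--         newChunks[index]+=upside
--
--     return newChunks
-- ===== SOURCE B (Python) =====
-- def _count(parts, half):
--     # how many leading parts fit: first position whose cumulative length
--     # reaches half, found by binary search on the prefix-sum array
--     cums = []
--     total = 0
--     for p in parts:
--         total += len(p)
--         cums.append(total)
--     lo, hi = 0, len(cums)
--     while lo < hi: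
--         mid = (lo + hi) // 2
--         if cums[mid] < half:
--             lo = mid + 1
--         else:
--             hi = mid
--     return lo
--
--
-- def collect_chunks_(chunks, idxs, bound=2000):
--     half = int(bound) // 2
--     n = len(chunks)
--     result = []
--     for idx in idxs:
--         ahead = [chunks[i] for i in range(idx, n)]
--         behind = [chunks[i] for i in range(idx - 1, -1, -1)]
--         result.append(list("".join(behind[:_count(behind, half)])
--                            + "".join(ahead[:_count(ahead, half)])))
--     return result
-- ===== Notes on version B (the rewrite author's own statement) =====
-- stated objective: alternative
-- what changed: B replaces A's two while-loops that mutate a cursor and concatenate strings character-run by run with: materialising the visiting order as index-range comprehensions, a prefix-sum array per direction, and a binary search on it for how many chunks fit, then one slice-and-join; Pre_ excludes only the inputs where both programs raise IndexError (an idx outside [-len(chunks), len(chunks)]).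
import Mathlib
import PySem

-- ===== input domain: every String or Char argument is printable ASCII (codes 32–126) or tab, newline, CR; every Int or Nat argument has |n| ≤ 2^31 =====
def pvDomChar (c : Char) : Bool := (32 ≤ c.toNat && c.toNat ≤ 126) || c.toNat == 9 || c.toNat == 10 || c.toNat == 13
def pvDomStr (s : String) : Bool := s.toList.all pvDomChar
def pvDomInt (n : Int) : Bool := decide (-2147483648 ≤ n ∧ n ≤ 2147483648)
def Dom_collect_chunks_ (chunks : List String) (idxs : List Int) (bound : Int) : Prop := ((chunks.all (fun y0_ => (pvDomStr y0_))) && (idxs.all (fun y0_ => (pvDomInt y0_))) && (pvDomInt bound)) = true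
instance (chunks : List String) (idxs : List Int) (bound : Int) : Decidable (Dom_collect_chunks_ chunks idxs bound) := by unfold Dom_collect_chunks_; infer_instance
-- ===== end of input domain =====

-- B gathers the candidate chunks per direction as index-range comprehensions, then finds how
-- many fit by binary search on a prefix-sum array (objective: alternative).
-- Python strings are handled on the List Char side (PySem.Chars representation; exact on the ASCII domain).

-- ===== PORT A =====
-- chunks[i] (Python indexing, negative i from the end) as a char list; the IndexError case
-- (pyGet? = none) is excluded by Pre_collect_chunks_, the default "" there is never reached inside Pre_.
def pvChunkA (chunks : List String) (i : Int) : List Char :=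
  ((PySem.List.pyGet? chunks i).getD "").toList

-- the first while loop: walk upward from idx, appending chunks while the length stays < halfBound
def upLoopA (chunks : List String) (half : Int) (idx : Int) (up : List Char) : List Char :=
  if h : (chunks.length : Int) ≤ idx ∨ half ≤ (up.length : Int) + ((pvChunkA chunks idx).length : Int) then up
  else upLoopA chunks half (idx + 1) (up ++ pvChunkA chunks idx)
termination_by ((chunks.length : Int) - idx).toNat
decreasing_by simp only [not_or, not_le] at h; omega

-- the second while loop: walk downward from idx-1
def downLoopA (chunks : List String) (half : Int) (idx : Int) (down : List Char) : List Char :=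
  if h : idx < 0 ∨ half ≤ (down.length : Int) + ((pvChunkA chunks idx).length : Int) then down
  else downLoopA chunks half (idx - 1) (down ++ pvChunkA chunks idx)
termination_by (idx + 1).toNat
decreasing_by simp only [not_or, not_le] at h; omega

def collect_chunks_ (chunks : List String) (idxs : List Int) (bound : Int) : List (List String) :=
  let newChunks : List (List String) := idxs.map (fun _ => [])
  let halfBound : Int := PySem.Int.floordiv bound 2
  (List.range newChunks.length).foldl (fun nc (index : Nat) =>
    let idx := (PySem.List.pyGet? idxs (index : Int)).getD 0
    let upside := upLoopA chunks halfBound idx []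
    let downside := downLoopA chunks halfBound (idx - 1) []
    let nc := nc.set index (nc.getD index [] ++ downside.map (fun c => String.ofList [c]))
    nc.set index (nc.getD index [] ++ upside.map (fun c => String.ofList [c]))) newChunks

-- ===== PORT B =====
-- the cums-building loop of _count: running total carried, one prefix sum appended per part
def pvCums (parts : List String) (total : Int) : List Int :=
  match parts with
  | [] => []
  | p :: rest => (total + PySem.Str.len p) :: pvCums rest (total + PySem.Str.len p)

-- the 'while lo < hi' binary search of _count; cums[mid] is always in range (lo ≤ mid < hi ≤ len)
def pvBS (cums : List Int) (half : Int) (lo hi : Nat) : Nat :=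
  if _h : lo < hi then
    let mid := (lo + hi) / 2
    if cums.getD mid 0 < half then pvBS cums half (mid + 1) hi else pvBS cums half lo mid
  else lo
termination_by hi - lo
decreasing_by all_goals omega

def pvCount (parts : List String) (half : Int) : Nat :=
  let cums := pvCums parts 0
  pvBS cums half 0 cums.length

def collect_chunks__alt (chunks : List String) (idxs : List Int) (bound : Int) : List (List String) :=
  let half : Int := PySem.Int.floordiv bound 2
  let n : Int := (chunks.length : Int)
  idxs.foldl (fun result idx =>
    -- chunks[i]: the getD "" default is the IndexError case, never reached inside Pre_
    let ahead := (PySem.List.pyRange idx n 1).map (fun i => (PySem.List.pyGet? chunks i).getD "")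
    let behind := (PySem.List.pyRange (idx - 1) (-1) (-1)).map (fun i => (PySem.List.pyGet? chunks i).getD "")
    result ++
    [ (((behind.take (pvCount behind half)).map String.toList).flatten).map (fun c => String.ofList [c]) ++
      (((ahead.take (pvCount ahead half)).map String.toList).flatten).map (fun c => String.ofList [c]) ]) []

-- ===== PRECONDITION & SPEC =====
-- A raises IndexError iff some idx lies outside [-len(chunks), len(chunks)] (below -len in the
-- forward walk, above len at the first backward access); B raises there too. Pre_ excludes exactly those inputs.
def Pre_collect_chunks_ (chunks : List String) (idxs : List Int) (bound : Int) : Prop :=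
  ∀ idx ∈ idxs, -(chunks.length : Int) ≤ idx ∧ idx ≤ (chunks.length : Int)
instance (chunks : List String) (idxs : List Int) (bound : Int) : Decidable (Pre_collect_chunks_ chunks idxs bound) := by unfold Pre_collect_chunks_; infer_instance

def pvWitness_collect_chunks_ : List String × List Int × Int := (["ab", "cd", "ef"], [1, 0, -1, 3], 6)

def Spec_collect_chunks_ (chunks : List String) (idxs : List Int) (bound : Int) (out : List (List String)) : Prop := out = collect_chunks__alt chunks idxs bound
instance (chunks : List String) (idxs : List Int) (bound : Int) (out : List (List String)) : Decidable (Spec_collect_chunks_ chunks idxs bound out) := by unfold Spec_collect_chunks_; infer_instance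

-- ===== CLAIM (what is proved, stated in full; the proofs are below) =====
def Claim_equal_collect_chunks_ : Prop := ∀ (chunks : List String) (idxs : List Int) (bound : Int), Dom_collect_chunks_ chunks idxs bound → Pre_collect_chunks_ chunks idxs bound → Spec_collect_chunks_ chunks idxs bound (collect_chunks_ chunks idxs bound)

-- ===== LEMMAS AND PROOFS =====

-- chunks[i] as a String (pvChunkA is its char list)
def pvChunkS (chunks : List String) (i : Int) : String :=
  (PySem.List.pyGet? chunks i).getD ""

-- the row A stores at a slot whose index holds idx
def pvRow (chunks : List String) (half : Int) (idx : Int) : List String :=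
  (downLoopA chunks half (idx - 1) []).map (fun c => String.ofList [c]) ++
  (upLoopA chunks half idx []).map (fun c => String.ofList [c])

-- abstract greedy chain: consume strings from the front while the accumulated length stays < half
def pvChain (half : Int) : List String → List Char → List Char
  | [], acc => acc
  | c :: rest, acc =>
    if half ≤ (acc.length : Int) + (c.toList.length : Int) then acc
    else pvChain half rest (acc ++ c.toList)

-- greedy count: length of the maximal prefix whose running total stays strictly under half
def pvGreedy (ls : List Int) (half : Int) (total : Int) : Nat :=
  match ls with
  | [] => 0
  | L :: rest => if half ≤ total + L then 0 else pvGreedy rest half (total + L) + 1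

-- the list of chunks A's forward walk can visit from idx, in visiting order
def pvFwd (chunks : List String) (idx : Int) : List String :=
  if idx < 0 then chunks.drop (chunks.length - (-idx).toNat) ++ chunks
  else chunks.drop idx.toNat

lemma pvChunkA_eq (chunks : List String) (i : Int) : pvChunkA chunks i = (pvChunkS chunks i).toList := rfl

lemma pvFwd_cons (chunks : List String) (idx : Int)
    (h0 : -(chunks.length : Int) ≤ idx) (h1 : idx < (chunks.length : Int)) :
    pvFwd chunks idx = pvChunkS chunks idx :: pvFwd chunks (idx + 1) := by
  unfold pvFwd pvChunkS
  by_cases hneg : idx < 0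
  · obtain ⟨k, rfl⟩ : ∃ k : Nat, idx = -(k : Int) := ⟨(-idx).toNat, by omega⟩
    simp only [neg_neg, Int.toNat_natCast]
    have hlt : chunks.length - k < chunks.length := by omega
    rw [if_pos hneg, List.drop_eq_getElem_cons hlt,
      PySem.List.pyGet?_neg_natCast chunks k (by omega) (by omega),
      List.getElem?_eq_getElem hlt]
    simp only [Option.getD_some, List.cons_append, List.cons.injEq, true_and]
    by_cases h2 : -(k : Int) + 1 < 0
    · rw [if_pos h2]
      have harg : chunks.length - k + 1 = chunks.length - (-(-(k : Int) + 1)).toNat := by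
        omega
      rw [harg]
    · rw [if_neg h2]
      have harg : chunks.length - k + 1 = chunks.length := by omega
      have h3 : (-(k : Int) + 1).toNat = 0 := by omega
      rw [harg, List.drop_length, List.nil_append, h3, List.drop_zero]
  · have hlt : idx.toNat < chunks.length := by omega
    have hget : PySem.List.pyGet? chunks idx = some chunks[idx.toNat] :=
      PySem.List.pyGet?_eq_some_getElem chunks (by omega) (by omega)
    rw [if_neg hneg, List.drop_eq_getElem_cons hlt, hget]
    simp only [Option.getD_some, List.cons.injEq, true_and]
    rw [if_neg (by omega : ¬ idx + 1 < 0)]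
    have harg : idx.toNat + 1 = (idx + 1).toNat := by omega
    rw [harg]

lemma pvFwd_nil (chunks : List String) (idx : Int) (h : (chunks.length : Int) ≤ idx) :
    pvFwd chunks idx = [] := by
  unfold pvFwd
  rw [if_neg (by omega : ¬ idx < 0)]
  exact List.drop_eq_nil_of_le (by omega)

-- A's forward walk is the greedy chain over pvFwd
lemma upLoopA_eq_chain (chunks : List String) (half : Int) :
    ∀ (idx : Int) (acc : List Char), -(chunks.length : Int) ≤ idx →
      upLoopA chunks half idx acc = pvChain half (pvFwd chunks idx) acc := by
  have main : ∀ (k : Nat) (idx : Int) (acc : List Char),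
      ((chunks.length : Int) - idx).toNat = k → -(chunks.length : Int) ≤ idx →
      upLoopA chunks half idx acc = pvChain half (pvFwd chunks idx) acc := by
    intro k
    induction k using Nat.strong_induction_on with
    | _ k ih =>
      intro idx acc hk h0
      rw [upLoopA]
      by_cases hg : (chunks.length : Int) ≤ idx ∨
          half ≤ (acc.length : Int) + ((pvChunkA chunks idx).length : Int)
      · rw [dif_pos hg]
        by_cases hge : (chunks.length : Int) ≤ idx
        · rw [pvFwd_nil chunks idx hge]
          rfl
        · rw [pvFwd_cons chunks idx h0 (by omega)]
          simp only [pvChain, ← pvChunkA_eq]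
          rw [if_pos (by cases hg with | inl h => omega | inr h => exact h)]
      · simp only [not_or, not_le] at hg
        rw [dif_neg (by omega)]
        rw [pvFwd_cons chunks idx h0 hg.1]
        simp only [pvChain, ← pvChunkA_eq]
        rw [if_neg (by omega)]
        exact ih ((chunks.length : Int) - (idx + 1)).toNat (by omega) (idx + 1)
          (acc ++ pvChunkA chunks idx) rfl (by omega)
  intro idx acc h0
  exact main ((chunks.length : Int) - idx).toNat idx acc rfl h0

lemma take_rev_cons (chunks : List String) (j : Int) (h0 : 0 ≤ j)
    (h1 : j < (chunks.length : Int)) :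
    (chunks.take (j + 1).toNat).reverse = pvChunkS chunks j :: (chunks.take j.toNat).reverse := by
  have hlt : j.toNat < chunks.length := by omega
  have hstep : (j + 1).toNat = j.toNat + 1 := by omega
  have hget : pvChunkS chunks j = chunks[j.toNat] := by
    unfold pvChunkS
    rw [PySem.List.pyGet?_eq_some_getElem chunks (by omega) (by omega)]
    rfl
  rw [hstep, List.take_add_one, List.getElem?_eq_getElem hlt, hget]
  simp

-- A's backward walk is the greedy chain over the reversed prefix
lemma downLoopA_eq_chain (chunks : List String) (half : Int) :
    ∀ (j : Int) (acc : List Char), j < (chunks.length : Int) →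
      downLoopA chunks half j acc = pvChain half ((chunks.take (j + 1).toNat).reverse) acc := by
  have main : ∀ (k : Nat) (j : Int) (acc : List Char),
      (j + 1).toNat = k → j < (chunks.length : Int) →
      downLoopA chunks half j acc = pvChain half ((chunks.take (j + 1).toNat).reverse) acc := by
    intro k
    induction k using Nat.strong_induction_on with
    | _ k ih =>
      intro j acc hk h1
      rw [downLoopA]
      by_cases hg : j < 0 ∨ half ≤ (acc.length : Int) + ((pvChunkA chunks j).length : Int)
      · rw [dif_pos hg]
        by_cases hjn : j < 0
        · have : (j + 1).toNat = 0 := by omega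
          rw [this]
          simp [pvChain]
        · rw [take_rev_cons chunks j (by omega) h1]
          simp only [pvChain, ← pvChunkA_eq]
          rw [if_pos (by cases hg with | inl h => omega | inr h => exact h)]
      · simp only [not_or, not_le] at hg
        rw [dif_neg (by omega)]
        rw [take_rev_cons chunks j (by omega) h1]
        simp only [pvChain, ← pvChunkA_eq]
        rw [if_neg (by omega)]
        have htail : (j - 1 + 1).toNat = j.toNat := by omega
        have := ih (j - 1 + 1).toNat (by omega) (j - 1) (acc ++ pvChunkA chunks j) rfl
          (by omega)
        rw [this, htail]
  intro j acc h1
  exact main (j + 1).toNat j acc rfl h1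

-- the greedy chain joins the prefix measured out by pvGreedy
lemma pvChain_eq_greedy (half : Int) :
    ∀ (xs : List String) (acc : List Char),
      pvChain half xs acc =
        acc ++ ((xs.take (pvGreedy (xs.map PySem.Str.len) half (acc.length : Int))).map String.toList).flatten := by
  intro xs
  induction xs with
  | nil => intro acc; simp [pvChain, pvGreedy]
  | cons c rest ih =>
    intro acc
    have hlen : PySem.Str.len c = (c.toList.length : Int) := PySem.Str.len_eq c
    simp only [pvChain, List.map_cons, pvGreedy]
    by_cases h : half ≤ (acc.length : Int) + (c.toList.length : Int)
    · rw [if_pos h, if_pos (by rw [hlen]; exact h)]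
      simp
    · rw [if_neg h, if_neg (by rw [hlen]; exact h)]
      rw [ih (acc ++ c.toList)]
      have harg : ((acc ++ c.toList).length : Int) = (acc.length : Int) + PySem.Str.len c := by
        rw [hlen]; push_cast; simp
      rw [harg]
      simp [List.append_assoc]

lemma pvGetDLen {α : Type} (l : List α) (y : α) (t : List α) (d : α) :
    (l ++ y :: t).getD l.length d = y := by
  induction l with
  | nil => rfl
  | cons x xs ih => simpa using ih

lemma pvSetLen {α : Type} (l : List α) (y : α) (t : List α) (v : α) :
    (l ++ y :: t).set l.length v = l ++ v :: t := by
  induction l with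
  | nil => rfl
  | cons x xs ih => simpa using ih

-- A's per-slot assignment loop produces exactly the map of pvRow over idxs
lemma pvFold (chunks : List String) (half : Int) :
    ∀ (suf pre : List Int) (done : List (List String)), done.length = pre.length →
      (List.range' pre.length suf.length).foldl (fun nc (index : Nat) =>
        let idx := (PySem.List.pyGet? (pre ++ suf) (index : Int)).getD 0
        let upside := upLoopA chunks half idx []
        let downside := downLoopA chunks half (idx - 1) []
        let nc := nc.set index (nc.getD index [] ++ downside.map (fun c => String.ofList [c]))
        nc.set index (nc.getD index [] ++ upside.map (fun c => String.ofList [c])))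
        (done ++ suf.map (fun _ => []))
      = done ++ suf.map (pvRow chunks half) := by
  intro suf
  induction suf with
  | nil => intro pre done hlen; simp
  | cons a suf ih =>
    intro pre done hlen
    simp only [List.length_cons, List.range'_succ, List.foldl_cons, List.map_cons]
    have hget : PySem.List.pyGet? (pre ++ a :: suf) ((pre.length : Nat) : Int) = some a :=
      PySem.List.pyGet?_append_length pre suf a
    rw [hget]
    simp only [Option.getD_some]
    rw [← hlen]
    rw [pvGetDLen, pvSetLen, pvGetDLen, pvSetLen]
    have hrow : (([] : List String) ++
        (downLoopA chunks half (a - 1) []).map (fun c => String.ofList [c])) ++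
        (upLoopA chunks half a []).map (fun c => String.ofList [c]) = pvRow chunks half a := by
      simp [pvRow]
    rw [hrow]
    have hre : pre.length + 1 = (pre ++ [a]).length := by simp
    rw [hlen, hre, List.append_cons done (pvRow chunks half a), List.append_cons pre a]
    rw [ih (pre ++ [a]) (done ++ [pvRow chunks half a]) (by simp [hlen])]
    simp

lemma collect_chunks_eq_map (chunks : List String) (idxs : List Int) (bound : Int) :
    collect_chunks_ chunks idxs bound = idxs.map (pvRow chunks (PySem.Int.floordiv bound 2)) := by
  have h := pvFold chunks (PySem.Int.floordiv bound 2) idxs [] [] rfl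
  simp only [List.nil_append, List.length_nil] at h
  unfold collect_chunks_
  simpa [List.range_eq_range'] using h

-- ---- B-side lemmas ----

-- every prefix sum is at least the carried total, and the array is nondecreasing
lemma pvCums_ge (parts : List String) : ∀ (t : Int), ∀ x ∈ pvCums parts t, t ≤ x := by
  induction parts with
  | nil => intro t x hx; simp [pvCums] at hx
  | cons p rest ih =>
    intro t x hx
    have hlen : 0 ≤ PySem.Str.len p := by
      rw [PySem.Str.len_eq]; positivity
    simp only [pvCums, List.mem_cons] at hx
    rcases hx with rfl | hx
    · omega
    · have := ih (t + PySem.Str.len p) x hx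
      omega

lemma pvCums_sorted (parts : List String) (t : Int) :
    (pvCums parts t).Pairwise (· ≤ ·) := by
  induction parts generalizing t with
  | nil => simp [pvCums]
  | cons p rest ih =>
    simp only [pvCums, List.pairwise_cons]
    exact ⟨fun x hx => pvCums_ge rest (t + PySem.Str.len p) x hx, ih _⟩

-- pvGreedy over the lengths is the takeWhile length of the prefix-sum array
lemma greedy_eq_takeWhile (half : Int) (parts : List String) : ∀ (t : Int),
    pvGreedy (parts.map PySem.Str.len) half t =
      ((pvCums parts t).takeWhile (fun c => decide (c < half))).length := by
  induction parts with
  | nil => intro t; simp [pvGreedy, pvCums]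
  | cons p rest ih =>
    intro t
    simp only [List.map_cons, pvGreedy, pvCums, List.takeWhile_cons]
    by_cases h : half ≤ t + PySem.Str.len p
    · rw [if_pos h]
      rw [decide_eq_false (by omega : ¬ (t + PySem.Str.len p < half))]
      simp
    · rw [if_neg h]
      rw [decide_eq_true (by omega : t + PySem.Str.len p < half), if_pos rfl]
      simp only [List.length_cons]
      rw [ih (t + PySem.Str.len p)]

-- elements of the takeWhile prefix satisfy the predicate; the stopping element does not
lemma tw_lt (l : List Int) (half : Int) (j : Nat)
    (hj : j < (l.takeWhile (fun c => decide (c < half))).length) :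
    l.getD j 0 < half := by
  induction l generalizing j with
  | nil => simp [List.takeWhile] at hj
  | cons x xs ih =>
    rw [List.takeWhile_cons] at hj
    by_cases hx : x < half
    · rw [decide_eq_true hx, if_pos rfl] at hj
      simp only [List.length_cons] at hj
      cases j with
      | zero => simpa using hx
      | succ j => exact ih j (by omega)
    · rw [decide_eq_false hx] at hj
      simp at hj

lemma tw_stop (l : List Int) (half : Int)
    (h : (l.takeWhile (fun c => decide (c < half))).length < l.length) :
    ¬ l.getD (l.takeWhile (fun c => decide (c < half))).length 0 < half := by
  induction l with
  | nil => simp at h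
  | cons x xs ih =>
    rw [List.takeWhile_cons]
    by_cases hx : x < half
    · rw [decide_eq_true hx, if_pos rfl]
      rw [List.takeWhile_cons, decide_eq_true hx, if_pos rfl] at h
      simp only [List.length_cons] at h ⊢
      exact ih (by omega)
    · rw [decide_eq_false hx]
      simpa using hx

lemma tw_le_length (l : List Int) (p : Int → Bool) :
    (l.takeWhile p).length ≤ l.length := (List.takeWhile_sublist p).length_le

-- sorted access: entries below an entry < half are themselves < half
lemma sorted_getD_le (l : List Int) (hs : l.Pairwise (· ≤ ·)) (i j : Nat)
    (hij : i ≤ j) (hj : j < l.length) : l.getD i 0 ≤ l.getD j 0 := by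
  rcases eq_or_lt_of_le hij with rfl | hlt
  · exact le_rfl
  · have hi : i < l.length := by omega
    rw [List.getD_eq_getElem l 0 hi, List.getD_eq_getElem l 0 hj]
    exact List.pairwise_iff_getElem.mp hs i j hi hj hlt

-- the binary search lands exactly on the takeWhile length
lemma pvBS_eq_tw (cums : List Int) (half : Int) (hs : cums.Pairwise (· ≤ ·)) :
    ∀ (fuel lo hi : Nat), hi - lo ≤ fuel →
      lo ≤ (cums.takeWhile (fun c => decide (c < half))).length →
      (cums.takeWhile (fun c => decide (c < half))).length ≤ hi → hi ≤ cums.length →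
      pvBS cums half lo hi = (cums.takeWhile (fun c => decide (c < half))).length := by
  intro fuel
  induction fuel with
  | zero =>
    intro lo hi hf h1 h2 h3
    rw [pvBS]
    rw [dif_neg (by omega)]
    omega
  | succ fuel ih =>
    intro lo hi hf h1 h2 h3
    set c := (cums.takeWhile (fun c => decide (c < half))).length with hc
    rw [pvBS]
    by_cases hlo : lo < hi
    · rw [dif_pos hlo]
      set mid := (lo + hi) / 2 with hmid
      have hmlt : mid < hi := by omega
      have hmge : lo ≤ mid := by omega
      by_cases hv : cums.getD mid 0 < half
      · rw [if_pos hv]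
        -- mid < c: otherwise c ≤ mid < hi ≤ len and cums[c] ≥ half while cums[c] ≤ cums[mid] < half
        have hcm : mid < c := by
          by_contra hcon
          have hcl : c < cums.length := by omega
          have := tw_stop cums half (by omega)
          have hle := sorted_getD_le cums hs c mid (by omega) (by omega)
          rw [← hc] at this
          omega
        exact ih (mid + 1) hi (by omega) (by omega) h2 h3
      · rw [if_neg hv]
        -- c ≤ mid: otherwise mid < c and cums[mid] < half
        have hcm : c ≤ mid := by
          by_contra hcon
          exact hv (tw_lt cums half mid (by omega))
        exact ih lo mid (by omega) h1 (by omega) (by omega)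
    · rw [dif_neg hlo]
      omega

-- pvCount is the greedy count
lemma pvCount_eq_greedy (parts : List String) (half : Int) :
    pvCount parts half = pvGreedy (parts.map PySem.Str.len) half 0 := by
  unfold pvCount
  rw [greedy_eq_takeWhile]
  exact pvBS_eq_tw (pvCums parts 0) half (pvCums_sorted parts 0)
    (pvCums parts 0).length 0 (pvCums parts 0).length (by omega) (by omega)
    (tw_le_length _ _) (by omega)

-- ahead = the forward visiting order pvFwd
lemma ahead_eq_pvFwd (chunks : List String) :
    ∀ (idx : Int), -(chunks.length : Int) ≤ idx →
      (PySem.List.pyRange idx (chunks.length : Int) 1).map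
          (fun i => (PySem.List.pyGet? chunks i).getD "") = pvFwd chunks idx := by
  have main : ∀ (k : Nat) (idx : Int), ((chunks.length : Int) - idx).toNat = k →
      -(chunks.length : Int) ≤ idx →
      (PySem.List.pyRange idx (chunks.length : Int) 1).map
          (fun i => (PySem.List.pyGet? chunks i).getD "") = pvFwd chunks idx := by
    intro k
    induction k using Nat.strong_induction_on with
    | _ k ih =>
      intro idx hk h0
      by_cases hge : (chunks.length : Int) ≤ idx
      · rw [PySem.List.pyRange_one_eq_nil hge, pvFwd_nil chunks idx hge]
        rfl
      · rw [PySem.List.pyRange_one_cons (by omega), pvFwd_cons chunks idx h0 (by omega)]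
        simp only [List.map_cons]
        rw [ih ((chunks.length : Int) - (idx + 1)).toNat (by omega) (idx + 1) rfl (by omega)]
        rfl
  intro idx h0
  exact main ((chunks.length : Int) - idx).toNat idx rfl h0

-- behind = the reversed prefix before idx
lemma behind_eq_rev_take (chunks : List String) :
    ∀ (idx : Int), idx ≤ (chunks.length : Int) →
      (PySem.List.pyRange (idx - 1) (-1) (-1)).map
          (fun i => (PySem.List.pyGet? chunks i).getD "") = (chunks.take idx.toNat).reverse := by
  have main : ∀ (k : Nat) (idx : Int), idx.toNat = k → idx ≤ (chunks.length : Int) →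
      (PySem.List.pyRange (idx - 1) (-1) (-1)).map
          (fun i => (PySem.List.pyGet? chunks i).getD "") = (chunks.take idx.toNat).reverse := by
    intro k
    induction k using Nat.strong_induction_on with
    | _ k ih =>
      intro idx hk h1
      by_cases hpos : 0 < idx
      · rw [PySem.List.pyRange_neg_one_cons (by omega : (-1 : Int) < idx - 1)]
        simp only [List.map_cons]
        have h2 : idx.toNat = ((idx - 1) + 1).toNat := by omega
        rw [h2, take_rev_cons chunks (idx - 1) (by omega) (by omega),
          ih (idx - 1).toNat (by omega) (idx - 1) rfl (by omega)]
        rfl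
      · rw [PySem.List.pyRange_neg_one_eq_nil (by omega : idx - 1 ≤ -1)]
        have : idx.toNat = 0 := by omega
        rw [this]
        simp
  intro idx h1
  exact main idx.toNat idx rfl h1

-- B's row equals A's row on in-range idx
lemma row_eq (chunks : List String) (half : Int) (idx : Int)
    (h0 : -(chunks.length : Int) ≤ idx) (h1 : idx ≤ (chunks.length : Int)) :
    (let ahead := (PySem.List.pyRange idx (chunks.length : Int) 1).map
        (fun i => (PySem.List.pyGet? chunks i).getD "")
     let behind := (PySem.List.pyRange (idx - 1) (-1) (-1)).map
        (fun i => (PySem.List.pyGet? chunks i).getD "")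
     (((behind.take (pvCount behind half)).map String.toList).flatten).map (fun c => String.ofList [c]) ++
     (((ahead.take (pvCount ahead half)).map String.toList).flatten).map (fun c => String.ofList [c]))
    = pvRow chunks half idx := by
  simp only
  rw [ahead_eq_pvFwd chunks idx h0, behind_eq_rev_take chunks idx h1,
    pvCount_eq_greedy, pvCount_eq_greedy]
  unfold pvRow
  have hup : upLoopA chunks half idx [] =
      ((( pvFwd chunks idx).take (pvGreedy ((pvFwd chunks idx).map PySem.Str.len) half 0)).map String.toList).flatten := by
    rw [upLoopA_eq_chain chunks half idx [] h0, pvChain_eq_greedy]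
    simp
  have hdown : downLoopA chunks half (idx - 1) [] =
      ((((chunks.take idx.toNat).reverse).take
          (pvGreedy (((chunks.take idx.toNat).reverse).map PySem.Str.len) half 0)).map String.toList).flatten := by
    rw [downLoopA_eq_chain chunks half (idx - 1) [] (by omega)]
    have : (idx - 1 + 1).toNat = idx.toNat := by omega
    rw [this, pvChain_eq_greedy]
    simp
  rw [hup, hdown]

-- ===== VERDICT (by name: the statement is the Claim_ definition above) =====
theorem collect_chunks__spec : Claim_equal_collect_chunks_ := by
  intro chunks idxs bound _ hpre
  unfold Spec_collect_chunks_
  rw [collect_chunks_eq_map]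
  unfold collect_chunks__alt
  rw [PySem.List.foldl_append_singleton_eq_map, List.nil_append]
  exact (List.map_congr_left (fun idx hidx =>
    row_eq chunks (PySem.Int.floordiv bound 2) idx (hpre idx hidx).1 (hpre idx hidx).2)).symm
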